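-- pv_equiv track=rewrite | github.com/mayankhansraj12/Placify-MP | server/ml/predictor.py | get_quick_actions
-- ===== SOURCE A (Python) =====
-- def get_quick_actions(skill_gaps: list, features: dict) -> list:
--     """Get the top immediate actions to improve placement chances."""
--     actions = []
--
--     weak_skills = [gap for gap in skill_gaps if gap["status"] == "weak"]
--     if weak_skills:
--         worst = weak_skills[0]
--         actions.append(
--             f"Urgently improve {worst['skill']} (currently {worst['current_score']}/100). {worst['recommendation']}"
--         )
--
--     if features.get("coding_problems_solved", 0) < 200:
--         actions.append("Solve at least 200 coding problems on LeetCode or HackerRank to clear technical rounds.")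
--     elif features.get("coding_problems_solved", 0) < 400:
--         actions.append("Push your coding problem count to 400+ or start targeting hard-level problems.")
--
--     if features.get("projects", 0) < 3:
--         actions.append("Build at least 3 substantial projects to showcase on your resume and GitHub.")
--
--     if features.get("certifications", 0) < 2:
--         actions.append("Get at least 2 industry certifications from AWS, Google, Microsoft, or Coursera.")
--
--     if features.get("internships", 0) < 1:
--         actions.append("Try to secure at least one internship. It significantly boosts placement chances.")
--
--     if features.get("aptitude_score", 0) < 60:
--         actions.append("Practice aptitude regularly on IndiaBix or PrepInsta for screening rounds.")
--
--     return actions[:3]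
-- ===== SOURCE B (Python) =====
-- def get_quick_actions(skill_gaps: list, features: dict) -> list:
--     """Get the top immediate actions to improve placement chances."""
--     def first_weak(gaps):
--         if not gaps:
--             return []
--         g = gaps[0]
--         if g["status"] == "weak":
--             return [
--                 f"Urgently improve {g['skill']} (currently {g['current_score']}/100). {g['recommendation']}"
--             ]
--         return first_weak(gaps[1:])
--
--     RULES = [
--         ("coding_problems_solved", None, 200,
--          "Solve at least 200 coding problems on LeetCode or HackerRank to clear technical rounds."),
--         ("coding_problems_solved", 200, 400,
--          "Push your coding problem count to 400+ or start targeting hard-level problems."),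
--         ("projects", None, 3,
--          "Build at least 3 substantial projects to showcase on your resume and GitHub."),
--         ("certifications", None, 2,
--          "Get at least 2 industry certifications from AWS, Google, Microsoft, or Coursera."),
--         ("internships", None, 1,
--          "Try to secure at least one internship. It significantly boosts placement chances."),
--         ("aptitude_score", None, 60,
--          "Practice aptitude regularly on IndiaBix or PrepInsta for screening rounds."),
--     ]
--     msgs = [m for key, lo, hi, m in RULES
--             if (lo is None or features.get(key, 0) >= lo) and features.get(key, 0) < hi]
--     return (first_weak(skill_gaps) + msgs)[:3]
-- ===== Notes on version B (the rewrite author's own statement) =====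
-- stated objective: alternative
-- what changed: B replaces A's unrolled if/elif append chain by a data-driven rule table of disjoint half-open intervals (lo, hi) per feature key filtered in one uniform pass (the coding if/elif becomes two disjoint interval rules), with the weak-skill head computed by a recursive first-match scan instead of filtering all gaps.
import Mathlib
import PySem

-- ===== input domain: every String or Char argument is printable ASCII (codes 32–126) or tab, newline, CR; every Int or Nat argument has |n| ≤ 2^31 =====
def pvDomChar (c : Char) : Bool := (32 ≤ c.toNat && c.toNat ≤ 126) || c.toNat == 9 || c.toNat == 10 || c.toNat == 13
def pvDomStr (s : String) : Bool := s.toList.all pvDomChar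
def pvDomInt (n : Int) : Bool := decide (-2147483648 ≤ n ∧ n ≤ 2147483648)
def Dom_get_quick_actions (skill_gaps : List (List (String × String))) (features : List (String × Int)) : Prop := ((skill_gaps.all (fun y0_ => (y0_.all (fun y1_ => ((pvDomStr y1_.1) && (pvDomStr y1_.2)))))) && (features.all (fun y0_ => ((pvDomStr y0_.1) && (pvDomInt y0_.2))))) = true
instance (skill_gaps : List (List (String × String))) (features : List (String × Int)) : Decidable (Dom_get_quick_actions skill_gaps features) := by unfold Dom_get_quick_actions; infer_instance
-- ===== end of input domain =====

-- B replaces A's unrolled if/elif append chain by a rule table of disjoint half-open intervals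
-- filtered in one uniform pass, with a recursive first-weak-gap scan (objective: alternative).

-- ===== PORT A =====
def pvWeakMsgA (worst : List (String × String)) : String :=
  "Urgently improve " ++ PySem.Dict.getD (PySem.Dict.ofList worst) "skill" "" ++ " (currently "
    ++ PySem.Dict.getD (PySem.Dict.ofList worst) "current_score" "" ++ "/100). "
    ++ PySem.Dict.getD (PySem.Dict.ofList worst) "recommendation" ""

def get_quick_actions (skill_gaps : List (List (String × String))) (features : List (String × Int)) : List String :=
  let actions : List String := []
  let weak_skills := skill_gaps.filter (fun g => PySem.Dict.getD (PySem.Dict.ofList g) "status" "" == "weak")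
  let actions := match weak_skills with
    | [] => actions
    | worst :: _ => actions ++ [pvWeakMsgA worst]
  let actions :=
    if PySem.Dict.getD (PySem.Dict.ofList features) "coding_problems_solved" (0 : Int) < 200 then
      actions ++ ["Solve at least 200 coding problems on LeetCode or HackerRank to clear technical rounds."]
    else if PySem.Dict.getD (PySem.Dict.ofList features) "coding_problems_solved" (0 : Int) < 400 then
      actions ++ ["Push your coding problem count to 400+ or start targeting hard-level problems."]
    else actions
  let actions :=
    if PySem.Dict.getD (PySem.Dict.ofList features) "projects" (0 : Int) < 3 then
      actions ++ ["Build at least 3 substantial projects to showcase on your resume and GitHub."]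
    else actions
  let actions :=
    if PySem.Dict.getD (PySem.Dict.ofList features) "certifications" (0 : Int) < 2 then
      actions ++ ["Get at least 2 industry certifications from AWS, Google, Microsoft, or Coursera."]
    else actions
  let actions :=
    if PySem.Dict.getD (PySem.Dict.ofList features) "internships" (0 : Int) < 1 then
      actions ++ ["Try to secure at least one internship. It significantly boosts placement chances."]
    else actions
  let actions :=
    if PySem.Dict.getD (PySem.Dict.ofList features) "aptitude_score" (0 : Int) < 60 then
      actions ++ ["Practice aptitude regularly on IndiaBix or PrepInsta for screening rounds."]
    else actions
  actions.take 3

-- ===== PORT B =====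
-- recursive helper first_weak of Source B
def pvFirstWeak : List (List (String × String)) → List String
  | [] => []
  | g :: rest =>
      if PySem.Dict.getD (PySem.Dict.ofList g) "status" "" == "weak" then
        ["Urgently improve " ++ PySem.Dict.getD (PySem.Dict.ofList g) "skill" "" ++ " (currently "
          ++ PySem.Dict.getD (PySem.Dict.ofList g) "current_score" "" ++ "/100). "
          ++ PySem.Dict.getD (PySem.Dict.ofList g) "recommendation" ""]
      else pvFirstWeak rest

-- RULES table of Source B: (key, lo, hi, message); rule fires iff lo ≤ features.get(key,0) < hi
def pvRules : List (String × Option Int × Int × String) :=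
  [ ("coding_problems_solved", none, 200,
     "Solve at least 200 coding problems on LeetCode or HackerRank to clear technical rounds."),
    ("coding_problems_solved", some 200, 400,
     "Push your coding problem count to 400+ or start targeting hard-level problems."),
    ("projects", none, 3,
     "Build at least 3 substantial projects to showcase on your resume and GitHub."),
    ("certifications", none, 2,
     "Get at least 2 industry certifications from AWS, Google, Microsoft, or Coursera."),
    ("internships", none, 1,
     "Try to secure at least one internship. It significantly boosts placement chances."),
    ("aptitude_score", none, 60,
     "Practice aptitude regularly on IndiaBix or PrepInsta for screening rounds.") ]

def get_quick_actions_alt (skill_gaps : List (List (String × String))) (features : List (String × Int)) : List String :=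
  let msgs := (pvRules.filter (fun r =>
      (match r.2.1 with
        | none => true
        | some lo => decide (lo ≤ PySem.Dict.getD (PySem.Dict.ofList features) r.1 (0 : Int)))
      && decide (PySem.Dict.getD (PySem.Dict.ofList features) r.1 (0 : Int) < r.2.2.1))).map
      (fun r => r.2.2.2)
  (pvFirstWeak skill_gaps ++ msgs).take 3

-- ===== PRECONDITION & SPEC =====
-- Pre_ excludes exactly the inputs on which A raises KeyError: a gap without a "status" key, or a
-- first weak gap missing "skill"/"current_score"/"recommendation".
def Pre_get_quick_actions (skill_gaps : List (List (String × String))) (features : List (String × Int)) : Prop :=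
  (skill_gaps.all (fun g => (PySem.Dict.get? (PySem.Dict.ofList g) "status").isSome)
    && (skill_gaps.find? (fun g => PySem.Dict.getD (PySem.Dict.ofList g) "status" "" == "weak")).all
         (fun w => (PySem.Dict.get? (PySem.Dict.ofList w) "skill").isSome
           && (PySem.Dict.get? (PySem.Dict.ofList w) "current_score").isSome
           && (PySem.Dict.get? (PySem.Dict.ofList w) "recommendation").isSome)) = true

instance (skill_gaps : List (List (String × String))) (features : List (String × Int)) : Decidable (Pre_get_quick_actions skill_gaps features) := by unfold Pre_get_quick_actions; infer_instance

def pvWitness_get_quick_actions : (List (List (String × String))) × (List (String × Int)) :=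
  ([[("status", "weak"), ("skill", "DSA"), ("current_score", "40"), ("recommendation", "Practice daily.")]],
   [("projects", 5), ("aptitude_score", 80)])

def Spec_get_quick_actions (skill_gaps : List (List (String × String))) (features : List (String × Int)) (out : List String) : Prop := out = get_quick_actions_alt skill_gaps features
instance (skill_gaps : List (List (String × String))) (features : List (String × Int)) (out : List String) : Decidable (Spec_get_quick_actions skill_gaps features out) := by unfold Spec_get_quick_actions; infer_instance

-- ===== CLAIM (what is proved, stated in full; the proofs are below) =====
def Claim_equal_get_quick_actions : Prop := ∀ (skill_gaps : List (List (String × String))) (features : List (String × Int)), Dom_get_quick_actions skill_gaps features → Pre_get_quick_actions skill_gaps features → Spec_get_quick_actions skill_gaps features (get_quick_actions skill_gaps features)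

-- ===== LEMMAS AND PROOFS =====

-- push an accumulator out of a conditional append
theorem pvPushIte (c : Prop) [Decidable c] (a x : List String) :
    (if c then a ++ x else a) = a ++ (if c then x else []) := by
  split <;> simp

theorem pvIteAppend (c : Prop) [Decidable c] (a x z : List String) :
    (if c then a ++ x else a ++ z) = a ++ (if c then x else z) := by
  split <;> rfl

-- B's filtered-table messages in append normal form
theorem pvMsgsEq (fs : List (String × Int)) :
    (pvRules.filter (fun r =>
      (match r.2.1 with
        | none => true
        | some lo => decide (lo ≤ PySem.Dict.getD (PySem.Dict.ofList fs) r.1 (0 : Int)))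
      && decide (PySem.Dict.getD (PySem.Dict.ofList fs) r.1 (0 : Int) < r.2.2.1))).map
      (fun r => r.2.2.2)
    = (if PySem.Dict.getD (PySem.Dict.ofList fs) "coding_problems_solved" (0 : Int) < 200 then
        ["Solve at least 200 coding problems on LeetCode or HackerRank to clear technical rounds."] else [])
      ++ (if 200 ≤ PySem.Dict.getD (PySem.Dict.ofList fs) "coding_problems_solved" (0 : Int)
            ∧ PySem.Dict.getD (PySem.Dict.ofList fs) "coding_problems_solved" (0 : Int) < 400 then
        ["Push your coding problem count to 400+ or start targeting hard-level problems."] else [])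
      ++ (if PySem.Dict.getD (PySem.Dict.ofList fs) "projects" (0 : Int) < 3 then
        ["Build at least 3 substantial projects to showcase on your resume and GitHub."] else [])
      ++ (if PySem.Dict.getD (PySem.Dict.ofList fs) "certifications" (0 : Int) < 2 then
        ["Get at least 2 industry certifications from AWS, Google, Microsoft, or Coursera."] else [])
      ++ (if PySem.Dict.getD (PySem.Dict.ofList fs) "internships" (0 : Int) < 1 then
        ["Try to secure at least one internship. It significantly boosts placement chances."] else [])
      ++ (if PySem.Dict.getD (PySem.Dict.ofList fs) "aptitude_score" (0 : Int) < 60 then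
        ["Practice aptitude regularly on IndiaBix or PrepInsta for screening rounds."] else []) := by
  simp only [pvRules, List.filter_cons, List.filter_nil, Bool.true_and, Bool.and_eq_true,
    decide_eq_true_eq]
  split_ifs <;> rfl

-- the if/elif one-of-two equals two disjoint interval rules
theorem pvCoding (v : Int) (m1 m2 : String) :
    (if v < 200 then [m1] else if v < 400 then [m2] else [])
      = (if v < 200 then [m1] else []) ++ (if 200 ≤ v ∧ v < 400 then [m2] else ([] : List String)) := by
  split_ifs <;> simp_all <;> omega

-- A's filter-then-head equals B's recursive first-weak scan
theorem pvFirstWeak_eq_filter (l : List (List (String × String))) :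
    pvFirstWeak l = (match l.filter (fun g => PySem.Dict.getD (PySem.Dict.ofList g) "status" "" == "weak") with
      | [] => ([] : List String)
      | worst :: _ => [pvWeakMsgA worst]) := by
  induction l with
  | nil => simp [pvFirstWeak]
  | cons x xs ih =>
      by_cases h : (PySem.Dict.getD (PySem.Dict.ofList x) "status" "" == "weak") = true <;>
        simp [pvFirstWeak, h, ih, pvWeakMsgA]

-- ===== VERDICT (by name: the statement is the Claim_ definition above) =====
theorem get_quick_actions_spec : Claim_equal_get_quick_actions := by
  intro sg fs _ _
  unfold Spec_get_quick_actions get_quick_actions get_quick_actions_alt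
  rw [pvFirstWeak_eq_filter]
  rw [pvMsgsEq]
  simp only [List.nil_append, pvPushIte, pvIteAppend]
  rw [pvCoding]
  simp only [List.append_assoc]
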